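-- pv_equiv track=rewrite | github.com/JackMGrundy/coding-challenges | companies-leetcode/bloomberg/arrays-and-strings/candy-crush.py | crush
-- ===== SOURCE A (Python) =====
-- def crush(board):
--     squaresToCrush = [ [ 0 for square in row ] for row in board ]
--     crushed = False
--
--     # rows
--     for y, row in enumerate(board):
--         for x, currentValue in enumerate(row[:len(row)-2]):
--             if board[y][x] != 0 and board[y][x] == board[y][x+1] == board[y][x+2]:
--                 squaresToCrush[y][x], squaresToCrush[y][x+1], squaresToCrush[y][x+2] = 1, 1, 1
--                 crushed = True
--
--     # columns
--     for x in range(len(board[0])):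
--         for y in range(len(board[:len(board)-2])):
--             if board[y][x] != 0 and board[y][x] == board[y+1][x] == board[y+2][x]:
--                 squaresToCrush[y][x], squaresToCrush[y+1][x], squaresToCrush[y+2][x] = 1, 1, 1
--                 crushed = True
--
--     for y in range(len(board)):
--         for x in range(len(board[0])):
--             if squaresToCrush[y][x] == 1:
--                 board[y][x] = 0
--
--     return (crushed, board)
-- ===== SOURCE B (Python) =====
-- def crush(board):
--     # Run-length decomposition: per line, find maximal runs of equal nonzero
--     # values of length >= 3 and record their cells; then zero the recorded
--     # cells of the original board in place.
--     def scan_line(line):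
--         found, idxs = False, []
--         i, n = 0, len(line)
--         while i < n:
--             v = line[i]
--             j = i
--             while j < n and line[j] == v:
--                 j += 1
--             if v != 0 and j - i >= 3:
--                 found = True
--                 idxs.extend(range(i, j))
--             i = j
--         return found, idxs
--
--     crushed, marks = False, []
--     for y, row in enumerate(board):
--         found, idxs = scan_line(row)
--         crushed = crushed or found
--         marks.extend((y, k) for k in idxs)
--     for x in range(len(board[0])):
--         found, idxs = scan_line([row[x] for row in board])
--         crushed = crushed or found
--         marks.extend((k, x) for k in idxs)
--     for y, x in marks:
--         board[y][x] = 0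
--     return (crushed, board)
-- ===== Notes on version B (the rewrite author's own statement) =====
-- stated objective: alternative
-- what changed: Replaces the overlapping sliding-triple test plus a parallel 0/1 mark grid with a run-length scan: each row and each column is walked once tracking maximal runs of equal nonzero cells, every cell of a run of length >= 3 is recorded in a mark list, and the recorded cells are zeroed in one final pass.
-- intended difference: On boards whose later rows are longer than row 0 and where a horizontal run of >=3 equal nonzero cells reaches column len(board[0]) or beyond, A returns the run only partially crushed (its zeroing pass only covers columns < len(board[0])), while B zeroes the whole run, which is the intended crush. — e.g. on crush([[1], [2, 2, 2]]): A returns (true, [[1], [0, 2, 2]]), B returns (true, [[1], [0, 0, 0]])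
import Mathlib
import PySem

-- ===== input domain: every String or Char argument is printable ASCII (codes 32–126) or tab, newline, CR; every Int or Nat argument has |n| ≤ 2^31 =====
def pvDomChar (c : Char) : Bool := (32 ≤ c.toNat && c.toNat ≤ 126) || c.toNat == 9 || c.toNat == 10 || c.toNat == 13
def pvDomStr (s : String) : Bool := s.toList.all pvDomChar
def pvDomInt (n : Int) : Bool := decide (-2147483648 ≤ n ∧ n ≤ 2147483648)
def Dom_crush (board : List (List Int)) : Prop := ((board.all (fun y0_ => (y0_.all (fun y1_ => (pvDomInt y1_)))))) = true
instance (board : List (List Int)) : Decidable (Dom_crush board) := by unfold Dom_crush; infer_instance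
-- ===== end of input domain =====

-- B replaces A's overlapping sliding-triple test + parallel 0/1 mark grid by a per-line
-- run-length scan that records the cells of maximal runs ≥ 3 in a mark list (objective:
-- alternative decomposition, same cost). Both Pythons mutate `board` in place and return
-- it; the equivalence proved here is about the returned value.

-- board[y][x] read/write; all indices that actually occur are in range under Pre_crush,
-- the getD/set defaults only make the functions total.
def get2 (g : List (List Int)) (y x : Nat) : Int := (g.getD y []).getD x 0
def set2 (g : List (List Int)) (y x : Nat) (v : Int) : List (List Int) :=
  g.set y ((g.getD y []).set x v)
-- enumerate(xs) with Nat indices (Python's indices here are always ≥ 0)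
def enumN {α : Type} : List α → Nat → List (Nat × α)
  | [], _ => []
  | a :: as, n => (n, a) :: enumN as (n+1)

-- ===== PORT A =====
def crush (board : List (List Int)) : Bool × List (List Int) :=
  -- squaresToCrush grid of 0s, crushed = False
  let s0 : List (List Int) × Bool := (board.map (fun row => row.map (fun _ => (0:Int))), false)
  -- rows
  let s1 := (enumN board 0).foldl (fun st yrow =>
      (enumN (yrow.2.take (yrow.2.length - 2)) 0).foldl (fun st xv =>
        if get2 board yrow.1 xv.1 ≠ 0 ∧ get2 board yrow.1 xv.1 = get2 board yrow.1 (xv.1+1)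
           ∧ get2 board yrow.1 (xv.1+1) = get2 board yrow.1 (xv.1+2) then
          (set2 (set2 (set2 st.1 yrow.1 xv.1 1) yrow.1 (xv.1+1) 1) yrow.1 (xv.1+2) 1, true)
        else st) st) s0
  -- columns
  let s2 := (List.range (board.headD []).length).foldl (fun st x =>
      (List.range (board.take (board.length - 2)).length).foldl (fun st y =>
        if get2 board y x ≠ 0 ∧ get2 board y x = get2 board (y+1) x
           ∧ get2 board (y+1) x = get2 board (y+2) x then
          (set2 (set2 (set2 st.1 y x 1) (y+1) x 1) (y+2) x 1, true)
        else st) st) s1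
  -- zero the marked squares of board
  let board2 := (List.range board.length).foldl (fun b y =>
      (List.range (board.headD []).length).foldl (fun b x =>
        if get2 s2.1 y x = 1 then set2 b y x 0 else b) b) board
  (s2.2, board2)

-- ===== PORT B =====
-- length of the maximal prefix of equal values v (the inner `while j < n and line[j] == v`)
def takeRun (v : Int) : List Int → Nat
  | [] => 0
  | a :: as => if a = v then takeRun v as + 1 else 0

-- scan_line's outer while loop; fuel = line length bounds the iteration count
def scanLine (line : List Int) : Nat → Nat → Bool × List Nat → Bool × List Nat
  | _, 0, acc => acc
  | i, fuel+1, acc =>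
    if i < line.length then
      let v := line.getD i 0
      let r := takeRun v (line.drop i)
      let acc' := if v ≠ 0 ∧ 3 ≤ r then (true, acc.2 ++ List.range' i r) else acc
      scanLine line (i + r) fuel acc'
    else acc

def crush_alt (board : List (List Int)) : Bool × List (List Int) :=
  -- rows
  let s1 := (enumN board 0).foldl (fun (st : Bool × List (Nat × Nat)) yrow =>
      let res := scanLine yrow.2 0 yrow.2.length (false, [])
      (st.1 || res.1, st.2 ++ res.2.map (fun k => (yrow.1, k)))) (false, [])
  -- columns
  let s2 := (List.range (board.headD []).length).foldl (fun st x =>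
      let col := board.map (fun row => row.getD x 0)
      let res := scanLine col 0 col.length (false, [])
      (st.1 || res.1, st.2 ++ res.2.map (fun k => (k, x)))) s1
  -- zero the marked squares
  (s2.1, s2.2.foldl (fun b p => set2 b p.1 p.2 0) board)

-- ===== PRECONDITION & SPEC =====
-- Pre_ is exactly where A returns: on the empty board len(board[0]) raises IndexError, and
-- when some row is shorter than row 0 the final pass (indices from len(board[0])) raises too.
def Pre_crush (board : List (List Int)) : Prop :=
  board ≠ [] ∧ ∀ row ∈ board, (board.headD []).length ≤ row.length
instance (board : List (List Int)) : Decidable (Pre_crush board) := by unfold Pre_crush; infer_instance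
def pvWitness_crush : List (List Int) := [[1, 1, 1], [1, 2, 3]]

-- On boards whose later rows are longer than row 0 and where a horizontal run of ≥3 equal
-- nonzero cells reaches column len(board[0]) or beyond, A (whose zeroing pass only covers
-- columns < len(board[0])) returns that run only partially crushed, while B zeroes the whole
-- run, which is the intended crush.
-- wideTriple w0 i l: some three consecutive equal nonzero cells of l, whose absolute start
-- index is offset by i, reach column w0 or beyond
def wideTriple (w0 : Nat) : Nat → List Int → Bool
  | i, a :: b :: c :: rest =>
      (decide (a ≠ 0) && decide (a = b) && decide (b = c) && decide (w0 ≤ i + 2))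
        || wideTriple w0 (i+1) (b :: c :: rest)
  | _, _ => false

def D_crush (board : List (List Int)) : Prop :=
  board.any (fun row => wideTriple (board.headD []).length 0 row) = true
instance (board : List (List Int)) : Decidable (D_crush board) := by
  unfold D_crush; infer_instance

def Spec_crush (board : List (List Int)) (out : Bool × List (List Int)) : Prop :=
  ¬ D_crush board → out = crush_alt board
instance (board : List (List Int)) (out : Bool × List (List Int)) : Decidable (Spec_crush board out) := by unfold Spec_crush; infer_instance

def pvDiffWitness_crush : List (List Int) := [[1], [2, 2, 2]]
def pvDiffWitnessOut_crush : (Bool × List (List Int)) × (Bool × List (List Int)) :=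
  ((true, [[1], [0, 2, 2]]), (true, [[1], [0, 0, 0]]))

-- ===== CLAIM (what is proved, stated in full; the proofs are below) =====
def Claim_unchanged_crush : Prop := ∀ (board : List (List Int)), Dom_crush board → Pre_crush board → Spec_crush board (crush board)
def Claim_changed_crush : Prop := Dom_crush (pvDiffWitness_crush) ∧ Pre_crush (pvDiffWitness_crush) ∧ D_crush (pvDiffWitness_crush) ∧ crush (pvDiffWitness_crush) = pvDiffWitnessOut_crush.1 ∧ crush_alt (pvDiffWitness_crush) = pvDiffWitnessOut_crush.2 ∧ pvDiffWitnessOut_crush.1 ≠ pvDiffWitnessOut_crush.2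
def Claim_exact_crush : Prop := ∀ (board : List (List Int)), Dom_crush board → Pre_crush board → D_crush board → crush board ≠ crush_alt board

-- ===== LEMMAS AND PROOFS =====

-- a horizontal/vertical Candy-Crush triple at offset s of a line, and a cell covered by one
def tripleAt (l : List Int) (s : Nat) : Prop :=
  s + 2 < l.length ∧ l.getD s 0 ≠ 0 ∧ l.getD s 0 = l.getD (s+1) 0 ∧ l.getD (s+1) 0 = l.getD (s+2) 0

def markedL (l : List Int) (x : Nat) : Prop := ∃ s, tripleAt l s ∧ s ≤ x ∧ x ≤ s + 2

def colL (board : List (List Int)) (x : Nat) : List Int := board.map (fun r => r.getD x 0)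

lemma length_set2 (g : List (List Int)) (a b : Nat) (v : Int) :
    (set2 g a b v).length = g.length := by simp [set2]

lemma rowlen_set2 (g : List (List Int)) (a b : Nat) (v : Int) (y : Nat) :
    ((set2 g a b v).getD y []).length = (g.getD y []).length := by
  unfold set2
  by_cases h : a = y
  · subst h
    by_cases ha : a < g.length
    · simp [List.getD, ha]
    · simp [List.getD, ha]
  · simp [List.getD, h]

lemma getD_set_eq (l : List Int) (b x : Nat) (v : Int) :
    ((l.set b v).getD x 0) = if b = x ∧ b < l.length then v else l.getD x 0 := by
  simp only [List.getD, List.getElem?_set]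
  by_cases hb : b = x
  · subst hb; by_cases hl : b < l.length <;> simp [hl]
  · simp [hb]

lemma get2_set2 (g : List (List Int)) (a b : Nat) (v : Int) (y x : Nat) :
    get2 (set2 g a b v) y x =
      if a = y ∧ b = x ∧ y < g.length ∧ x < (g.getD y []).length then v else get2 g y x := by
  unfold get2 set2
  by_cases h : a = y
  · subst h
    by_cases ha : a < g.length
    · have hrow : (g.set a ((g.getD a []).set b v)).getD a [] = (g.getD a []).set b v := by
        simp [List.getD, ha]
      rw [hrow, getD_set_eq]
      by_cases hb : b = x <;> by_cases hbl : b < (g.getD a []).length <;> simp_all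
    · have hg : g.set a ((g.getD a []).set b v) = g := List.set_eq_of_length_le (by omega)
      rw [hg]; simp [ha]
  · have hrow : (g.set a ((g.getD a []).set b v)).getD y [] = g.getD y [] := by
      simp [List.getD, h]
    rw [hrow]; simp [h]

lemma length_foldl_setv (v : Int) :
    ∀ (ps : List (Nat × Nat)) (g : List (List Int)),
      (ps.foldl (fun gg p => set2 gg p.1 p.2 v) g).length = g.length := by
  intro ps
  induction ps with
  | nil => intro g; rfl
  | cons p ps ih => intro g; rw [List.foldl_cons, ih, length_set2]

lemma rowlen_foldl_setv (v : Int) :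
    ∀ (ps : List (Nat × Nat)) (g : List (List Int)) (y : Nat),
      ((ps.foldl (fun gg p => set2 gg p.1 p.2 v) g).getD y []).length = (g.getD y []).length := by
  intro ps
  induction ps with
  | nil => intro g y; rfl
  | cons p ps ih => intro g y; rw [List.foldl_cons, ih, rowlen_set2]

lemma get2_foldl_setv (v : Int) :
    ∀ (ps : List (Nat × Nat)) (g : List (List Int)) (y x : Nat),
      get2 (ps.foldl (fun gg p => set2 gg p.1 p.2 v) g) y x =
      if (y, x) ∈ ps ∧ y < g.length ∧ x < (g.getD y []).length then v else get2 g y x := by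
  intro ps
  induction ps with
  | nil => intro g y x; simp
  | cons p ps ih =>
      intro g y x
      rw [List.foldl_cons, ih, get2_set2]
      simp only [length_set2, rowlen_set2, List.mem_cons]
      by_cases h1 : (y, x) ∈ ps <;> by_cases h2 : p.1 = y ∧ p.2 = x <;>
        by_cases h3 : y < g.length ∧ x < (g.getD y []).length
      all_goals
        simp_all [Prod.ext_iff]
      all_goals omega

lemma enumN_eq {α : Type} (d : α) :
    ∀ (xs : List α) (m : Nat), enumN xs m = (List.range xs.length).map (fun i => (m + i, xs.getD i d)) := by
  intro xs
  induction xs with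
  | nil => intro m; rfl
  | cons a as ih =>
      intro m
      simp only [enumN, List.length_cons, List.range_succ_eq_map, List.map_cons, List.map_map]
      congr 1
      rw [ih (m+1)]
      apply List.map_congr_left
      intro i _
      simp [Function.comp, List.getD]
      omega

lemma takeRun_le (v : Int) : ∀ l : List Int, takeRun v l ≤ l.length := by
  intro l; induction l with
  | nil => simp [takeRun]
  | cons a as ih => by_cases h : a = v <;> simp [takeRun, h] ; omega

lemma takeRun_getD (v : Int) : ∀ (l : List Int) (t : Nat), t < takeRun v l → l.getD t 0 = v := by
  intro l; induction l with
  | nil => intro t ht; simp [takeRun] at ht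
  | cons a as ih =>
      intro t ht
      by_cases h : a = v
      · cases t with
        | zero => simp [h]
        | succ t =>
            simp only [takeRun, if_pos h] at ht
            simpa using ih t (by omega)
      · simp [takeRun, h] at ht

lemma takeRun_max (v : Int) : ∀ l : List Int, takeRun v l = l.length ∨ l.getD (takeRun v l) 0 ≠ v := by
  intro l; induction l with
  | nil => left; rfl
  | cons a as ih =>
      by_cases h : a = v
      · rcases ih with h1 | h1
        · left; simp [takeRun, h, h1]
        · right; simp only [takeRun, if_pos h, List.getD_cons_succ]; exact h1
      · right; simp only [takeRun, if_neg h, List.getD_cons_zero]; exact h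

lemma getD_drop (l : List Int) (i t : Nat) : (l.drop i).getD t 0 = l.getD (i + t) 0 := by
  simp [List.getD, List.getElem?_drop]

lemma run_facts (line : List Int) (i : Nat) (hi : i < line.length) :
    1 ≤ takeRun (line.getD i 0) (line.drop i) ∧
    i + takeRun (line.getD i 0) (line.drop i) ≤ line.length ∧
    (∀ t, t < takeRun (line.getD i 0) (line.drop i) → line.getD (i + t) 0 = line.getD i 0) ∧
    (i + takeRun (line.getD i 0) (line.drop i) = line.length ∨
      line.getD (i + takeRun (line.getD i 0) (line.drop i)) 0 ≠ line.getD i 0) := by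
  have hlen : (line.drop i).length = line.length - i := List.length_drop
  have hle := takeRun_le (line.getD i 0) (line.drop i)
  have hall : ∀ t, t < takeRun (line.getD i 0) (line.drop i) → line.getD (i + t) 0 = line.getD i 0 :=
    fun t ht => by rw [← getD_drop]; exact takeRun_getD _ _ t ht
  have hd0 : (line.drop i).getD 0 0 = line.getD i 0 := by simp [List.getD]
  have h1 : 1 ≤ takeRun (line.getD i 0) (line.drop i) := by
    rcases takeRun_max (line.getD i 0) (line.drop i) with hm | hm
    · omega
    · by_contra hc
      have hz : takeRun (line.getD i 0) (line.drop i) = 0 := by omega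
      rw [hz] at hm; exact hm hd0
  refine ⟨h1, by omega, hall, ?_⟩
  rcases takeRun_max (line.getD i 0) (line.drop i) with hm | hm
  · left; omega
  · right; rw [← getD_drop]; exact hm

-- a triple cannot straddle a run boundary on the left
lemma no_straddle (line : List Int) (i s : Nat)
    (hb : i = 0 ∨ line.length ≤ i ∨ line.getD (i-1) 0 ≠ line.getD i 0)
    (ht : tripleAt line s) (hs1 : s < i) (hs2 : i ≤ s + 2) : False := by
  obtain ⟨hlen, hnz, he1, he2⟩ := ht
  rcases hb with hb | hb | hb
  · omega
  · omega
  · have hcase : i = s + 1 ∨ i = s + 2 := by omega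
    rcases hcase with h | h <;> subst h <;> simp_all

-- a triple inside the current maximal run forces a nonzero run of length ≥ 3
lemma triple_in_run (line : List Int) (i r s : Nat)
    (h1 : 1 ≤ r) (h2 : i + r ≤ line.length)
    (hall : ∀ t, t < r → line.getD (i + t) 0 = line.getD i 0)
    (hmax : i + r = line.length ∨ line.getD (i + r) 0 ≠ line.getD i 0)
    (ht : tripleAt line s) (hsi : i ≤ s) (hsr : s < i + r) :
    line.getD i 0 ≠ 0 ∧ 3 ≤ r ∧ s + 2 < i + r := by
  obtain ⟨hlen, hnz, he1, he2⟩ := ht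
  have hlt : s + 2 < i + r := by
    by_contra hc
    have hirn : i + r < line.length := by omega
    have hne : line.getD (i + r) 0 ≠ line.getD i 0 := by
      rcases hmax with hm | hm
      · omega
      · exact hm
    have hv1 : line.getD (i + r - 1) 0 = line.getD i 0 := by
      have := hall (r - 1) (by omega)
      have heq : i + (r - 1) = i + r - 1 := by omega
      rwa [heq] at this
    have hcase : i + r = s + 1 ∨ i + r = s + 2 := by omega
    rcases hcase with h | h
    · rw [h] at hne
      have hs' : i + r - 1 = s := by omega
      rw [hs'] at hv1
      exact hne (by rw [← he1, hv1])
    · rw [h] at hne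
      have hs' : i + r - 1 = s + 1 := by omega
      rw [hs'] at hv1
      exact hne (by rw [← he2, hv1])
  have hsv : line.getD s 0 = line.getD i 0 := by
    have := hall (s - i) (by omega)
    have heq : i + (s - i) = s := by omega
    rwa [heq] at this
  exact ⟨by rw [← hsv]; exact hnz, by omega, hlt⟩

-- every cell of a nonzero maximal run of length ≥ 3 is covered by a triple
lemma run_marked (line : List Int) (i r k : Nat)
    (h2 : i + r ≤ line.length)
    (hall : ∀ t, t < r → line.getD (i + t) 0 = line.getD i 0)
    (hnz : line.getD i 0 ≠ 0) (h3 : 3 ≤ r)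
    (hk1 : i ≤ k) (hk2 : k < i + r) : markedL line k := by
  set s := if k + 2 < i + r then k else i + r - 3 with hs
  have hsb : i ≤ s ∧ s ≤ k ∧ k ≤ s + 2 ∧ s + 2 < i + r := by
    by_cases h : k + 2 < i + r <;> simp [hs, h] <;> omega
  have hv : ∀ t, i ≤ t → t < i + r → line.getD t 0 = line.getD i 0 := by
    intro t ht1 ht2
    have := hall (t - i) (by omega)
    have heq : i + (t - i) = t := by omega
    rwa [heq] at this
  refine ⟨s, ⟨by omega, ?_, ?_, ?_⟩, by omega, by omega⟩
  · rw [hv s (by omega) (by omega)]; exact hnz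
  · rw [hv s (by omega) (by omega), hv (s+1) (by omega) (by omega)]
  · rw [hv (s+1) (by omega) (by omega), hv (s+2) (by omega) (by omega)]

lemma scan_inv (line : List Int) :
    ∀ (fuel i : Nat) (acc : Bool × List Nat),
      line.length ≤ i + fuel →
      (i = 0 ∨ line.length ≤ i ∨ line.getD (i-1) 0 ≠ line.getD i 0) →
      ((scanLine line i fuel acc).1 = true ↔ (acc.1 = true ∨ ∃ s, i ≤ s ∧ tripleAt line s)) ∧
      (∀ k, k ∈ (scanLine line i fuel acc).2 ↔ (k ∈ acc.2 ∨ (i ≤ k ∧ markedL line k))) := by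
  intro fuel
  induction fuel with
  | zero =>
      intro i acc hf hb
      constructor
      · simp only [scanLine]
        constructor
        · intro h; exact Or.inl h
        · rintro (h | ⟨s, hs, ht⟩)
          · exact h
          · exact absurd ht.1 (by omega)
      · intro k
        simp only [scanLine]
        constructor
        · intro h; exact Or.inl h
        · rintro (h | ⟨hk, s, ht, hs1, hs2⟩)
          · exact h
          · exact absurd ht.1 (by omega)
  | succ fuel ih =>
      intro i acc hf hb
      by_cases hi : i < line.length
      · obtain ⟨h1, h2, hall, hmax⟩ := run_facts line i hi
        have hstep : scanLine line i (fuel+1) acc =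
            scanLine line (i + takeRun (line.getD i 0) (line.drop i)) fuel
              (if line.getD i 0 ≠ 0 ∧ 3 ≤ takeRun (line.getD i 0) (line.drop i) then
                 (true, acc.2 ++ List.range' i (takeRun (line.getD i 0) (line.drop i))) else acc) := by
          conv_lhs => rw [scanLine]
          simp [hi]
        set r := takeRun (line.getD i 0) (line.drop i) with hr
        have hb' : (i + r = 0 ∨ line.length ≤ i + r ∨
            line.getD (i + r - 1) 0 ≠ line.getD (i + r) 0) := by
          rcases hmax with hm | hm
          · right; left; omega
          · right; right
            have hv1 : line.getD (i + r - 1) 0 = line.getD i 0 := by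
              have := hall (r - 1) (by omega)
              have heq : i + (r - 1) = i + r - 1 := by omega
              rwa [heq] at this
            rw [hv1]; exact fun h => hm (h.symm)
        have hf' : line.length ≤ (i + r) + fuel := by omega
        by_cases hc : line.getD i 0 ≠ 0 ∧ 3 ≤ r
        · obtain ⟨ihf, ihm⟩ := ih (i + r) (true, acc.2 ++ List.range' i r) hf' hb'
          rw [hstep, if_pos hc]
          constructor
          · rw [ihf]
            constructor
            · intro _
              right
              have e1 := hall 1 (by omega)
              have e2 := hall 2 (by omega)
              exact ⟨i, le_refl i, by omega, hc.1, e1.symm, by rw [e1, e2]⟩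
            · intro _; left; rfl
          · intro k
            rw [ihm k]
            simp only [List.mem_append, List.mem_range'_1]
            constructor
            · rintro ((h | h) | ⟨hk, hm⟩)
              · exact Or.inl h
              · exact Or.inr ⟨by omega, run_marked line i r k h2 hall hc.1 hc.2 (by omega) (by omega)⟩
              · exact Or.inr ⟨by omega, hm⟩
            · rintro (h | ⟨hk, hm⟩)
              · exact Or.inl (Or.inl h)
              · by_cases hkr : k < i + r
                · exact Or.inl (Or.inr ⟨by omega, by omega⟩)
                · exact Or.inr ⟨by omega, hm⟩
        · obtain ⟨ihf, ihm⟩ := ih (i + r) acc hf' hb'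
          rw [hstep, if_neg hc]
          have hnotriple : ∀ s, i ≤ s → s < i + r → ¬ tripleAt line s := by
            intro s hs1 hs2 ht
            obtain ⟨hnz, h3, _⟩ := triple_in_run line i r s h1 h2 hall hmax ht hs1 hs2
            exact hc ⟨hnz, h3⟩
          constructor
          · rw [ihf]
            constructor
            · rintro (h | ⟨s, hs, ht⟩)
              · exact Or.inl h
              · exact Or.inr ⟨s, by omega, ht⟩
            · rintro (h | ⟨s, hs, ht⟩)
              · exact Or.inl h
              · by_cases hsr : s < i + r
                · exact absurd ht (hnotriple s hs hsr)
                · exact Or.inr ⟨s, by omega, ht⟩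
          · intro k
            rw [ihm k]
            constructor
            · rintro (h | ⟨hk, hm⟩)
              · exact Or.inl h
              · exact Or.inr ⟨by omega, hm⟩
            · rintro (h | ⟨hk, hm⟩)
              · exact Or.inl h
              · by_cases hkr : k < i + r
                · exfalso
                  obtain ⟨s, ht, hs1, hs2⟩ := hm
                  by_cases hsi : s < i
                  · exact no_straddle line i s hb ht hsi (by omega)
                  · exact hnotriple s (by omega) (by omega) ht
                · exact Or.inr ⟨by omega, hm⟩
      · have hstep : scanLine line i (fuel+1) acc = acc := by
          conv_lhs => rw [scanLine]
          simp [hi]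
        rw [hstep]
        constructor
        · constructor
          · intro h; exact Or.inl h
          · rintro (h | ⟨s, hs, ht⟩)
            · exact h
            · exact absurd ht.1 (by omega)
        · intro k
          constructor
          · intro h; exact Or.inl h
          · rintro (h | ⟨hk, s, ht, hs1, hs2⟩)
            · exact h
            · exact absurd ht.1 (by omega)

-- the two line-level characterisations of scan_line
lemma scanLine_flag (line : List Int) :
    ((scanLine line 0 line.length (false, [])).1 = true ↔ ∃ s, tripleAt line s) := by
  have h := (scan_inv line line.length 0 (false, []) (by omega) (Or.inl rfl)).1
  rw [h]
  simp

lemma scanLine_mem (line : List Int) (k : Nat) :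
    (k ∈ (scanLine line 0 line.length (false, [])).2 ↔ markedL line k) := by
  have h := (scan_inv line line.length 0 (false, []) (by omega) (Or.inl rfl)).2 k
  rw [h]
  simp

lemma foldl_pair {ι γ : Type} (F : ι → Bool) (G : ι → List γ)
    (f : (Bool × List γ) → ι → (Bool × List γ))
    (hf : ∀ st i, f st i = (st.1 || F i, st.2 ++ G i)) :
    ∀ (l : List ι) (a : Bool × List γ),
      l.foldl f a = (a.1 || l.any F, a.2 ++ l.flatMap G) := by
  intro l
  induction l with
  | nil => intro a; simp
  | cons i l ih =>
      intro a
      rw [List.foldl_cons, hf, ih]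
      simp [Bool.or_assoc]

lemma foldl_nested {α β γ : Type} (L : α → List β) (f : γ → α → β → γ)
    (F : γ → α → γ) (hF : ∀ b i, F b i = (L i).foldl (fun b j => f b i j) b) :
    ∀ (l1 : List α) (a : γ),
      l1.foldl F a = (l1.flatMap (fun i => (L i).map (Prod.mk i))).foldl (fun b p => f b p.1 p.2) a := by
  intro l1
  induction l1 with
  | nil => intro a; simp
  | cons i l1 ih =>
      intro a
      rw [List.foldl_cons, hF, ih, List.flatMap_cons, List.foldl_append, List.foldl_map]

lemma if_or_collapse {P1 P2 P3 B Q : Prop} [Decidable P1] [Decidable P2] [Decidable P3]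
    [Decidable B] [Decidable Q] (h : P3 ↔ P1 ∨ P2) (hQ : Q ↔ P2 ∧ B) (z w : Int) :
    (if P1 ∧ B then w else if Q then w else z) = if P3 ∧ B then w else z := by
  split_ifs <;> tauto

lemma markphase_char {ι : Type} (C : ι → Prop) [DecidablePred C]
    (p1 p2 p3 : ι → Nat × Nat) (F : List (List Int) × Bool → ι → List (List Int) × Bool)
    (hF : ∀ st i, F st i = if C i then
        (set2 (set2 (set2 st.1 (p1 i).1 (p1 i).2 1) (p2 i).1 (p2 i).2 1) (p3 i).1 (p3 i).2 1, true)
      else st) :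
    ∀ (l : List ι) (a : List (List Int) × Bool),
      ((l.foldl F a).2 = true ↔ (a.2 = true ∨ ∃ i ∈ l, C i)) ∧
      (l.foldl F a).1.length = a.1.length ∧
      (∀ y, (((l.foldl F a).1.getD y []).length = (a.1.getD y []).length)) ∧
      (∀ y x, get2 (l.foldl F a).1 y x =
        if (∃ i ∈ l, C i ∧ ((y,x) = p1 i ∨ (y,x) = p2 i ∨ (y,x) = p3 i))
           ∧ y < a.1.length ∧ x < (a.1.getD y []).length then 1 else get2 a.1 y x) := by
  intro l
  induction l with
  | nil =>
      intro a
      refine ⟨by simp, rfl, fun y => rfl, fun y x => by simp⟩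
  | cons i l ih =>
      intro a
      rw [List.foldl_cons, hF]
      by_cases hC : C i
      · rw [if_pos hC]
        obtain ⟨ihf, ihl, ihr, ihg⟩ := ih
          (set2 (set2 (set2 a.1 (p1 i).1 (p1 i).2 1) (p2 i).1 (p2 i).2 1) (p3 i).1 (p3 i).2 1, true)
        have hset : (set2 (set2 (set2 a.1 (p1 i).1 (p1 i).2 1) (p2 i).1 (p2 i).2 1) (p3 i).1 (p3 i).2 1, true).1
            = [p1 i, p2 i, p3 i].foldl (fun gg p => set2 gg p.1 p.2 (1:Int)) a.1 := rfl
        refine ⟨by rw [ihf]; simp [hC], ?_, ?_, ?_⟩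
        · rw [ihl, hset, length_foldl_setv]
        · intro y; rw [ihr y, hset, rowlen_foldl_setv]
        · intro y x
          rw [ihg y x]
          have hset' : set2 (set2 (set2 a.1 (p1 i).1 (p1 i).2 1) (p2 i).1 (p2 i).2 1) (p3 i).1 (p3 i).2 1
              = [p1 i, p2 i, p3 i].foldl (fun gg p => set2 gg p.1 p.2 (1:Int)) a.1 := rfl
          simp only [hset', length_foldl_setv, rowlen_foldl_setv, get2_foldl_setv,
            List.mem_cons, List.not_mem_nil, or_false]
          have hiff : (∃ j ∈ i :: l, C j ∧ ((y,x) = p1 j ∨ (y,x) = p2 j ∨ (y,x) = p3 j)) ↔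
              (∃ j ∈ l, C j ∧ ((y,x) = p1 j ∨ (y,x) = p2 j ∨ (y,x) = p3 j)) ∨
              ((y,x) = p1 i ∨ (y,x) = p2 i ∨ (y,x) = p3 i) := by
            rw [List.exists_mem_cons_iff]; simp only [hC, true_and]; exact or_comm
          exact if_or_collapse (B := y < a.1.length ∧ x < (a.1.getD y []).length) hiff Iff.rfl _ _
      · rw [if_neg hC]
        obtain ⟨ihf, ihl, ihr, ihg⟩ := ih a
        refine ⟨?_, ihl, ihr, ?_⟩
        · rw [ihf, List.exists_mem_cons_iff]
          simp [hC]
        · intro y x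
          rw [ihg y x]
          refine if_congr (and_congr_left' ?_) rfl rfl
          rw [List.exists_mem_cons_iff]
          simp [hC]

lemma condset_char {ι : Type} (C : ι → Prop) [DecidablePred C] (pos : ι → Nat × Nat) (v : Int)
    (F : List (List Int) → ι → List (List Int))
    (hF : ∀ b i, F b i = if C i then set2 b (pos i).1 (pos i).2 v else b) :
    ∀ (l : List ι) (g : List (List Int)),
      (l.foldl F g).length = g.length ∧
      (∀ y, (((l.foldl F g).getD y []).length = (g.getD y []).length)) ∧
      (∀ y x, get2 (l.foldl F g) y x =
        if (∃ i ∈ l, C i ∧ pos i = (y, x)) ∧ y < g.length ∧ x < (g.getD y []).length then v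
        else get2 g y x) := by
  intro l
  induction l with
  | nil =>
      intro g
      refine ⟨rfl, fun y => rfl, fun y x => by simp⟩
  | cons i l ih =>
      intro g
      rw [List.foldl_cons, hF]
      by_cases hC : C i
      · rw [if_pos hC]
        obtain ⟨ihl, ihr, ihg⟩ := ih (set2 g (pos i).1 (pos i).2 v)
        refine ⟨by rw [ihl, length_set2], fun y => by rw [ihr y, rowlen_set2], ?_⟩
        intro y x
        rw [ihg y x, get2_set2]
        simp only [length_set2, rowlen_set2]
        have hiff : (∃ j ∈ i :: l, C j ∧ pos j = (y, x)) ↔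
            (∃ j ∈ l, C j ∧ pos j = (y, x)) ∨ pos i = (y, x) := by
          rw [List.exists_mem_cons_iff]; simp only [hC, true_and]; exact or_comm
        have hq : ((pos i).1 = y ∧ (pos i).2 = x ∧ y < g.length ∧ x < (g.getD y []).length) ↔
            (pos i = (y, x)) ∧ (y < g.length ∧ x < (g.getD y []).length) := by
          rw [Prod.ext_iff]; tauto
        exact if_or_collapse hiff hq _ _
      · rw [if_neg hC]
        obtain ⟨ihl, ihr, ihg⟩ := ih g
        refine ⟨ihl, ihr, ?_⟩
        intro y x
        rw [ihg y x]
        refine if_congr (and_congr_left' ?_) rfl rfl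
        rw [List.exists_mem_cons_iff]
        simp [hC]

def rowStep (board : List (List Int)) :
    (List (List Int) × Bool) → (Nat × Nat) → (List (List Int) × Bool) := fun st p =>
  if get2 board p.1 p.2 ≠ 0 ∧ get2 board p.1 p.2 = get2 board p.1 (p.2+1)
     ∧ get2 board p.1 (p.2+1) = get2 board p.1 (p.2+2) then
    (set2 (set2 (set2 st.1 p.1 p.2 1) p.1 (p.2+1) 1) p.1 (p.2+2) 1, true)
  else st

def colStep (board : List (List Int)) :
    (List (List Int) × Bool) → (Nat × Nat) → (List (List Int) × Bool) := fun st p =>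
  if get2 board p.2 p.1 ≠ 0 ∧ get2 board p.2 p.1 = get2 board (p.2+1) p.1
     ∧ get2 board (p.2+1) p.1 = get2 board (p.2+2) p.1 then
    (set2 (set2 (set2 st.1 p.2 p.1 1) (p.2+1) p.1 1) (p.2+2) p.1 1, true)
  else st

def finStep (g : List (List Int)) : List (List Int) → (Nat × Nat) → List (List Int) := fun bb p =>
  if get2 g p.1 p.2 = 1 then set2 bb p.1 p.2 0 else bb

def stc0 (board : List (List Int)) : List (List Int) :=
  board.map (fun row => row.map (fun _ => (0:Int)))

def rowScan (board : List (List Int)) (y : Nat) : Bool × List Nat :=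
  scanLine (board.getD y []) 0 (board.getD y []).length (false, [])

def colScan (board : List (List Int)) (x : Nat) : Bool × List Nat :=
  scanLine (colL board x) 0 (colL board x).length (false, [])

def rowIdx (board : List (List Int)) : List (Nat × Nat) :=
  (List.range board.length).flatMap (fun y => (List.range ((board.getD y []).length - 2)).map (Prod.mk y))

def colIdx (board : List (List Int)) : List (Nat × Nat) :=
  (List.range (board.headD []).length).flatMap (fun x => (List.range (board.length - 2)).map (Prod.mk x))

def finIdx (board : List (List Int)) : List (Nat × Nat) :=
  (List.range board.length).flatMap (fun y => (List.range (board.headD []).length).map (Prod.mk y))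

lemma take_sub_two_length {α : Type} (l : List α) : (l.take (l.length - 2)).length = l.length - 2 := by
  simp [List.length_take]

lemma getD_row_out (board : List (List Int)) (y : Nat) (h : board.length ≤ y) :
    board.getD y [] = [] := by
  simp [List.getD, List.getElem?_eq_none h]

lemma row_lt_of_len (board : List (List Int)) (y x : Nat) (h : x < (board.getD y []).length) :
    y < board.length := by
  by_contra hc
  rw [getD_row_out board y (by omega)] at h
  simp at h

lemma markedL_lt (l : List Int) (x : Nat) (h : markedL l x) : x < l.length := by
  obtain ⟨s, ⟨hs, _, _, _⟩, _, h2⟩ := h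
  omega

lemma colL_getD (board : List (List Int)) (x y : Nat) :
    (colL board x).getD y 0 = get2 board y x := by
  unfold colL get2
  simp only [List.getD, List.getElem?_map]
  by_cases hy : y < board.length
  · rw [List.getElem?_eq_getElem hy]
    simp
  · rw [List.getElem?_eq_none (by omega)]
    simp

lemma colL_length (board : List (List Int)) (x : Nat) : (colL board x).length = board.length := by
  simp [colL]

lemma rowfold_eq (board : List (List Int)) (a : List (List Int) × Bool) :
    (enumN board 0).foldl (fun st yrow =>
      (enumN (yrow.2.take (yrow.2.length - 2)) 0).foldl (fun st xv =>
        if get2 board yrow.1 xv.1 ≠ 0 ∧ get2 board yrow.1 xv.1 = get2 board yrow.1 (xv.1+1)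
           ∧ get2 board yrow.1 (xv.1+1) = get2 board yrow.1 (xv.1+2) then
          (set2 (set2 (set2 st.1 yrow.1 xv.1 1) yrow.1 (xv.1+1) 1) yrow.1 (xv.1+2) 1, true)
        else st) st) a
  = (rowIdx board).foldl (rowStep board) a := by
  rw [enumN_eq ([] : List Int) board 0, List.foldl_map]
  unfold rowStep
  simp only [zero_add, enumN_eq (0 : Int), List.foldl_map, take_sub_two_length]
  unfold rowIdx
  exact foldl_nested (L := fun y => List.range ((board.getD y []).length - 2))
    (f := fun st y x =>
      if get2 board y x ≠ 0 ∧ get2 board y x = get2 board y (x+1)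
         ∧ get2 board y (x+1) = get2 board y (x+2) then
        (set2 (set2 (set2 st.1 y x 1) y (x+1) 1) y (x+2) 1, true)
      else st) _ (fun b i => rfl) _ _

lemma colfold_eq (board : List (List Int)) (a : List (List Int) × Bool) :
    (List.range (board.headD []).length).foldl (fun st x =>
      (List.range (board.take (board.length - 2)).length).foldl (fun st y =>
        if get2 board y x ≠ 0 ∧ get2 board y x = get2 board (y+1) x
           ∧ get2 board (y+1) x = get2 board (y+2) x then
          (set2 (set2 (set2 st.1 y x 1) (y+1) x 1) (y+2) x 1, true)
        else st) st) a
  = (colIdx board).foldl (colStep board) a := by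
  unfold colStep
  simp only [take_sub_two_length]
  unfold colIdx
  exact foldl_nested (L := fun _ => List.range (board.length - 2))
    (f := fun st x y =>
      if get2 board y x ≠ 0 ∧ get2 board y x = get2 board (y+1) x
         ∧ get2 board (y+1) x = get2 board (y+2) x then
        (set2 (set2 (set2 st.1 y x 1) (y+1) x 1) (y+2) x 1, true)
      else st) _ (fun b i => rfl) _ _

lemma finfold_eq (board g : List (List Int)) (b : List (List Int)) :
    (List.range board.length).foldl (fun bb y =>
      (List.range (board.headD []).length).foldl (fun bb x =>
        if get2 g y x = 1 then set2 bb y x 0 else bb) bb) b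
  = (finIdx board).foldl (finStep g) b := by
  unfold finIdx finStep
  exact foldl_nested (L := fun _ => List.range (board.headD []).length)
    (f := fun bb y x => if get2 g y x = 1 then set2 bb y x 0 else bb) _ (fun b i => rfl) _ _

lemma bfold1_eq (board : List (List Int)) (a : Bool × List (Nat × Nat)) :
    (enumN board 0).foldl (fun (st : Bool × List (Nat × Nat)) yrow =>
      let res := scanLine yrow.2 0 yrow.2.length (false, [])
      (st.1 || res.1, st.2 ++ res.2.map (fun k => (yrow.1, k)))) a
  = (a.1 || (List.range board.length).any (fun y => (rowScan board y).1),
     a.2 ++ (List.range board.length).flatMap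
        (fun y => (rowScan board y).2.map (fun k => (y, k)))) := by
  unfold rowScan
  rw [enumN_eq ([] : List Int) board 0, List.foldl_map]
  simp only [zero_add]
  exact foldl_pair _ _ _ (fun st i => rfl) _ _

lemma bfold2_eq (board : List (List Int)) (a : Bool × List (Nat × Nat)) :
    (List.range (board.headD []).length).foldl (fun (st : Bool × List (Nat × Nat)) x =>
      let col := board.map (fun row => row.getD x 0)
      let res := scanLine col 0 col.length (false, [])
      (st.1 || res.1, st.2 ++ res.2.map (fun k => (k, x)))) a
  = (a.1 || (List.range (board.headD []).length).any (fun x => (colScan board x).1),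
     a.2 ++ (List.range (board.headD []).length).flatMap
        (fun x => (colScan board x).2.map (fun k => (k, x)))) := by
  unfold colScan colL
  exact foldl_pair _ _ _ (fun st i => rfl) _ _

lemma grid_ext (g1 g2 : List (List Int)) (hl : g1.length = g2.length)
    (hr : ∀ y, (g1.getD y []).length = (g2.getD y []).length)
    (hg : ∀ y x, y < g1.length → x < (g1.getD y []).length → get2 g1 y x = get2 g2 y x) :
    g1 = g2 := by
  apply List.ext_getElem hl
  intro y hy1 hy2
  apply List.ext_getElem
  · have := hr y
    rwa [List.getD_eq_getElem _ _ hy1, List.getD_eq_getElem _ _ hy2] at this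
  · intro x hx1 hx2
    have hx1' : x < (g1.getD y []).length := by rwa [List.getD_eq_getElem _ _ hy1]
    have := hg y x hy1 hx1'
    unfold get2 at this
    rwa [List.getD_eq_getElem _ _ hy1, List.getD_eq_getElem _ _ hy2,
      List.getD_eq_getElem _ _ hx1, List.getD_eq_getElem _ _ hx2] at this

lemma stc0_length (board : List (List Int)) : (stc0 board).length = board.length := by
  simp [stc0]

lemma stc0_rowlen (board : List (List Int)) (y : Nat) :
    ((stc0 board).getD y []).length = (board.getD y []).length := by
  unfold stc0
  simp only [List.getD, List.getElem?_map]
  cases board[y]? <;> simp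

lemma stc0_get2 (board : List (List Int)) (y x : Nat) : get2 (stc0 board) y x = 0 := by
  unfold get2 stc0
  simp only [List.getD, List.getElem?_map]
  cases hb : board[y]? with
  | none => simp
  | some r =>
      simp only [Option.map_some, Option.getD_some, List.getElem?_map]
      cases r[x]? <;> simp

lemma MR_bounds (board : List (List Int)) (y x : Nat) (h : markedL (board.getD y []) x) :
    y < board.length ∧ x < (board.getD y []).length := by
  have hx := markedL_lt _ _ h
  exact ⟨row_lt_of_len board y x hx, hx⟩

lemma MC_lt_h (board : List (List Int)) (y x : Nat) (h : markedL (colL board x) y) :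
    y < board.length := by
  obtain ⟨s, ⟨hlen, _, _, _⟩, hs1, hs2⟩ := h
  rw [colL_length] at hlen
  omega

lemma QR_iff (board : List (List Int)) (y x : Nat) :
    (∃ p ∈ rowIdx board,
        (get2 board p.1 p.2 ≠ 0 ∧ get2 board p.1 p.2 = get2 board p.1 (p.2+1)
          ∧ get2 board p.1 (p.2+1) = get2 board p.1 (p.2+2)) ∧
        ((y,x) = (p.1, p.2) ∨ (y,x) = (p.1, p.2+1) ∨ (y,x) = (p.1, p.2+2)))
    ↔ markedL (board.getD y []) x := by
  constructor
  · rintro ⟨⟨y', s⟩, hp, hc, hor⟩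
    have hmem : y' < board.length ∧ s < (board.getD y' []).length - 2 := by
      simp only [rowIdx, List.mem_flatMap, List.mem_map, List.mem_range] at hp
      obtain ⟨a, ha, b, hb, heq⟩ := hp
      obtain ⟨rfl, rfl⟩ := Prod.mk.injEq .. ▸ heq
      exact ⟨ha, hb⟩
    have hyx : y = y' ∧ (x = s ∨ x = s + 1 ∨ x = s + 2) := by
      rcases hor with h | h | h <;> (rw [Prod.mk.injEq] at h; tauto)
    obtain ⟨rfl, hx⟩ := hyx
    exact ⟨s, ⟨by omega, hc.1, hc.2.1, hc.2.2⟩, by omega, by omega⟩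
  · rintro ⟨s, ⟨hlen, hnz, h1, h2⟩, hs1, hs2⟩
    have hylt : y < board.length := row_lt_of_len board y s (by omega)
    refine ⟨(y, s), ?_, ⟨hnz, h1, h2⟩, ?_⟩
    · simp only [rowIdx, List.mem_flatMap, List.mem_map, List.mem_range]
      exact ⟨y, hylt, s, by omega, rfl⟩
    · have : x = s ∨ x = s + 1 ∨ x = s + 2 := by omega
      rcases this with rfl | rfl | rfl <;> simp

lemma QC_iff (board : List (List Int)) (y x : Nat) :
    (∃ p ∈ colIdx board,
        (get2 board p.2 p.1 ≠ 0 ∧ get2 board p.2 p.1 = get2 board (p.2+1) p.1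
          ∧ get2 board (p.2+1) p.1 = get2 board (p.2+2) p.1) ∧
        ((y,x) = (p.2, p.1) ∨ (y,x) = (p.2+1, p.1) ∨ (y,x) = (p.2+2, p.1)))
    ↔ (x < (board.headD []).length ∧ markedL (colL board x) y) := by
  constructor
  · rintro ⟨⟨x', s⟩, hp, hc, hor⟩
    have hmem : x' < (board.headD []).length ∧ s < board.length - 2 := by
      simp only [colIdx, List.mem_flatMap, List.mem_map, List.mem_range] at hp
      obtain ⟨a, ha, b, hb, heq⟩ := hp
      obtain ⟨rfl, rfl⟩ := Prod.mk.injEq .. ▸ heq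
      exact ⟨ha, hb⟩
    have hyx : x = x' ∧ (y = s ∨ y = s + 1 ∨ y = s + 2) := by
      rcases hor with h | h | h <;> (rw [Prod.mk.injEq] at h; tauto)
    obtain ⟨rfl, hy⟩ := hyx
    refine ⟨hmem.1, s, ⟨by rw [colL_length]; omega, ?_, ?_, ?_⟩, by omega, by omega⟩
    · rw [colL_getD]; exact hc.1
    · rw [colL_getD, colL_getD]; exact hc.2.1
    · rw [colL_getD, colL_getD]; exact hc.2.2
  · rintro ⟨hxw, s, ⟨hlen, hnz, h1, h2⟩, hs1, hs2⟩
    rw [colL_length] at hlen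
    rw [colL_getD] at hnz
    rw [colL_getD, colL_getD] at h1
    rw [colL_getD, colL_getD] at h2
    refine ⟨(x, s), ?_, ⟨hnz, h1, h2⟩, ?_⟩
    · simp only [colIdx, List.mem_flatMap, List.mem_map, List.mem_range]
      exact ⟨x, hxw, s, by omega, rfl⟩
    · have : y = s ∨ y = s + 1 ∨ y = s + 2 := by omega
      rcases this with rfl | rfl | rfl <;> simp

lemma rowflagA_iff (board : List (List Int)) :
    (∃ p ∈ rowIdx board,
        get2 board p.1 p.2 ≠ 0 ∧ get2 board p.1 p.2 = get2 board p.1 (p.2+1)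
          ∧ get2 board p.1 (p.2+1) = get2 board p.1 (p.2+2))
    ↔ ∃ y, y < board.length ∧ ∃ s, tripleAt (board.getD y []) s := by
  constructor
  · rintro ⟨⟨y, s⟩, hp, hc⟩
    have hmem : y < board.length ∧ s < (board.getD y []).length - 2 := by
      simp only [rowIdx, List.mem_flatMap, List.mem_map, List.mem_range] at hp
      obtain ⟨a, ha, b, hb, heq⟩ := hp
      obtain ⟨rfl, rfl⟩ := Prod.mk.injEq .. ▸ heq
      exact ⟨ha, hb⟩
    exact ⟨y, hmem.1, s, by omega, hc.1, hc.2.1, hc.2.2⟩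
  · rintro ⟨y, hy, s, ⟨hlen, hnz, h1, h2⟩⟩
    refine ⟨(y, s), ?_, hnz, h1, h2⟩
    simp only [rowIdx, List.mem_flatMap, List.mem_map, List.mem_range]
    exact ⟨y, hy, s, by omega, rfl⟩

lemma colflagA_iff (board : List (List Int)) :
    (∃ p ∈ colIdx board,
        get2 board p.2 p.1 ≠ 0 ∧ get2 board p.2 p.1 = get2 board (p.2+1) p.1
          ∧ get2 board (p.2+1) p.1 = get2 board (p.2+2) p.1)
    ↔ ∃ x, x < (board.headD []).length ∧ ∃ s, tripleAt (colL board x) s := by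
  constructor
  · rintro ⟨⟨x, s⟩, hp, hc⟩
    have hmem : x < (board.headD []).length ∧ s < board.length - 2 := by
      simp only [colIdx, List.mem_flatMap, List.mem_map, List.mem_range] at hp
      obtain ⟨a, ha, b, hb, heq⟩ := hp
      obtain ⟨rfl, rfl⟩ := Prod.mk.injEq .. ▸ heq
      exact ⟨ha, hb⟩
    refine ⟨x, hmem.1, s, ?_, ?_, ?_, ?_⟩
    · rw [colL_length]; omega
    · rw [colL_getD]; exact hc.1
    · rw [colL_getD, colL_getD]; exact hc.2.1
    · rw [colL_getD, colL_getD]; exact hc.2.2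
  · rintro ⟨x, hx, s, ⟨hlen, hnz, h1, h2⟩⟩
    rw [colL_length] at hlen
    rw [colL_getD] at hnz
    rw [colL_getD, colL_getD] at h1
    rw [colL_getD, colL_getD] at h2
    refine ⟨(x, s), ?_, hnz, h1, h2⟩
    simp only [colIdx, List.mem_flatMap, List.mem_map, List.mem_range]
    exact ⟨x, hx, s, by omega, rfl⟩

lemma anyrow_iff (board : List (List Int)) :
    ((List.range board.length).any (fun y => (rowScan board y).1) = true)
    ↔ ∃ y, y < board.length ∧ ∃ s, tripleAt (board.getD y []) s := by
  rw [List.any_eq_true]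
  constructor
  · rintro ⟨y, hy, hf⟩
    rw [List.mem_range] at hy
    exact ⟨y, hy, (scanLine_flag _).mp hf⟩
  · rintro ⟨y, hy, hs⟩
    exact ⟨y, List.mem_range.mpr hy, (scanLine_flag _).mpr hs⟩

lemma anycol_iff (board : List (List Int)) :
    ((List.range (board.headD []).length).any (fun x => (colScan board x).1) = true)
    ↔ ∃ x, x < (board.headD []).length ∧ ∃ s, tripleAt (colL board x) s := by
  rw [List.any_eq_true]
  constructor
  · rintro ⟨x, hx, hf⟩
    rw [List.mem_range] at hx
    exact ⟨x, hx, (scanLine_flag _).mp hf⟩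
  · rintro ⟨x, hx, hs⟩
    exact ⟨x, List.mem_range.mpr hx, (scanLine_flag _).mpr hs⟩

lemma marks_mem_iff (board : List (List Int)) (y x : Nat) :
    ((y, x) ∈ (([] : List (Nat × Nat)) ++ (List.range board.length).flatMap
          (fun y' => (rowScan board y').2.map (fun k => (y', k)))) ++
        (List.range (board.headD []).length).flatMap
          (fun x' => (colScan board x').2.map (fun k => (k, x')))
      ↔ (markedL (board.getD y []) x ∨
          (x < (board.headD []).length ∧ markedL (colL board x) y))) := by
  simp only [List.nil_append, List.mem_append, List.mem_flatMap, List.mem_map, List.mem_range]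
  constructor
  · rintro (⟨y', hy', k, hk, heq⟩ | ⟨x', hx', k, hk, heq⟩)
    · obtain ⟨rfl, rfl⟩ := Prod.mk.injEq .. ▸ heq
      exact Or.inl ((scanLine_mem _ _).mp hk)
    · obtain ⟨rfl, rfl⟩ := Prod.mk.injEq .. ▸ heq
      exact Or.inr ⟨hx', (scanLine_mem _ _).mp hk⟩
  · rintro (h | ⟨hxw, h⟩)
    · obtain ⟨hy, _⟩ := MR_bounds board y x h
      exact Or.inl ⟨y, hy, x, (scanLine_mem _ _).mpr h, rfl⟩
    · exact Or.inr ⟨x, hxw, y, (scanLine_mem _ _).mpr h, rfl⟩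

lemma finIdx_mem (board : List (List Int)) (y x : Nat) :
    (y, x) ∈ finIdx board ↔ y < board.length ∧ x < (board.headD []).length := by
  simp only [finIdx, List.mem_flatMap, List.mem_map, List.mem_range]
  constructor
  · rintro ⟨a, ha, b, hb, heq⟩
    obtain ⟨rfl, rfl⟩ := Prod.mk.injEq .. ▸ heq
    exact ⟨ha, hb⟩
  · rintro ⟨hy, hx⟩
    exact ⟨y, hy, x, hx, rfl⟩

lemma tripleAt_cons (a : Int) (l : List Int) (t : Nat) :
    tripleAt (a :: l) (t+1) ↔ tripleAt l t := by
  unfold tripleAt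
  simp only [List.length_cons, List.getD_cons_succ]
  constructor <;> (rintro ⟨h1, h⟩; exact ⟨by omega, h⟩)

lemma wideTriple_iff (w0 : Nat) :
    ∀ (l : List Int) (i : Nat),
      wideTriple w0 i l = true ↔ ∃ t, tripleAt l t ∧ w0 ≤ i + t + 2 := by
  intro l
  induction l with
  | nil =>
      intro i
      constructor
      · intro h; simp [wideTriple] at h
      · rintro ⟨t, ⟨h, _⟩, _⟩; simp at h
  | cons a l ih =>
      intro i
      cases l with
      | nil =>
          constructor
          · intro h; simp [wideTriple] at h
          · rintro ⟨t, ⟨h, _⟩, _⟩; simp at h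
      | cons b l2 =>
          cases l2 with
          | nil =>
              constructor
              · intro h; simp [wideTriple] at h
              · rintro ⟨t, ⟨h, _⟩, _⟩; simp at h
          | cons c rest =>
              rw [show wideTriple w0 i (a :: b :: c :: rest) =
                  ((decide (a ≠ 0) && decide (a = b) && decide (b = c) && decide (w0 ≤ i + 2))
                    || wideTriple w0 (i+1) (b :: c :: rest)) from rfl]
              rw [Bool.or_eq_true, ih (i+1)]
              simp only [Bool.and_eq_true, decide_eq_true_eq]
              constructor
              · rintro (⟨⟨⟨h1, h2⟩, h3⟩, h4⟩ | ⟨t, ht, hw⟩)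
                · exact ⟨0, ⟨by simp, by simpa using h1, by simp [h2], by simp [h3]⟩, by omega⟩
                · exact ⟨t + 1, (tripleAt_cons a _ t).mpr ht, by omega⟩
              · rintro ⟨t, ht, hw⟩
                cases t with
                | zero =>
                    left
                    obtain ⟨_, h1, h2, h3⟩ := ht
                    simp only [List.getD_cons_zero, List.getD_cons_succ] at h1 h2 h3
                    exact ⟨⟨⟨h1, h2⟩, h3⟩, by omega⟩
                | succ t =>
                    right
                    exact ⟨t, (tripleAt_cons a _ t).mp ht, by omega⟩

lemma D_iff (board : List (List Int)) :
    D_crush board ↔ ∃ y < board.length, ∃ s,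
      tripleAt (board.getD y []) s ∧ (board.headD []).length ≤ s + 2 := by
  unfold D_crush
  rw [List.any_eq_true]
  constructor
  · rintro ⟨row, hrow, hw⟩
    obtain ⟨y, hy, heq⟩ := List.mem_iff_getElem.mp hrow
    obtain ⟨t, ht, hle⟩ := (wideTriple_iff _ row 0).mp hw
    refine ⟨y, hy, t, ?_, by omega⟩
    rw [List.getD_eq_getElem _ _ hy, heq]
    exact ht
  · rintro ⟨y, hy, s, ht, hle⟩
    refine ⟨board.getD y [], ?_, ?_⟩
    · rw [List.getD_eq_getElem _ _ hy]
      exact List.getElem_mem hy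
    · rw [wideTriple_iff]
      exact ⟨s, ht, by omega⟩

-- the set of cells A zeroes, and the set of cells B zeroes
def markA (board : List (List Int)) (y x : Nat) : Prop :=
  (x < (board.headD []).length ∧
    (markedL (board.getD y []) x ∨ markedL (colL board x) y)) ∧
  y < board.length ∧ x < (board.getD y []).length

def markB (board : List (List Int)) (y x : Nat) : Prop :=
  (markedL (board.getD y []) x ∨
    (x < (board.headD []).length ∧ markedL (colL board x) y)) ∧
  y < board.length ∧ x < (board.getD y []).length

lemma crush_master (board : List (List Int)) (hpre : Pre_crush board) :
    (crush board).1 = (crush_alt board).1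
  ∧ (crush board).2.length = board.length
  ∧ (crush_alt board).2.length = board.length
  ∧ (∀ y, ((crush board).2.getD y []).length = (board.getD y []).length)
  ∧ (∀ y, ((crush_alt board).2.getD y []).length = (board.getD y []).length)
  ∧ (∀ y x, (markA board y x → get2 (crush board).2 y x = 0)
      ∧ (¬ markA board y x → get2 (crush board).2 y x = get2 board y x))
  ∧ (∀ y x, (markB board y x → get2 (crush_alt board).2 y x = 0)
      ∧ (¬ markB board y x → get2 (crush_alt board).2 y x = get2 board y x)) := by
  obtain ⟨hne, hgemem⟩ := hpre
  have hge : ∀ y, y < board.length → (board.headD []).length ≤ (board.getD y []).length := by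
    intro y hy
    rw [List.getD_eq_getElem _ _ hy]
    exact hgemem _ (List.getElem_mem hy)
  simp only [crush, crush_alt]
  rw [rowfold_eq, colfold_eq, finfold_eq, bfold1_eq, bfold2_eq]
  rw [show board.map (fun row => row.map (fun _ => (0:Int))) = stc0 board from rfl]
  set G1 : List (List Int) × Bool := (rowIdx board).foldl (rowStep board) (stc0 board, false) with hG1
  set G2 : List (List Int) × Bool := (colIdx board).foldl (colStep board) G1 with hG2
  -- row-phase characterisation
  have hrow := markphase_char
    (C := fun p : Nat × Nat => get2 board p.1 p.2 ≠ 0 ∧ get2 board p.1 p.2 = get2 board p.1 (p.2+1)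
      ∧ get2 board p.1 (p.2+1) = get2 board p.1 (p.2+2))
    (p1 := fun p => (p.1, p.2)) (p2 := fun p => (p.1, p.2+1)) (p3 := fun p => (p.1, p.2+2))
    (F := rowStep board) (fun st i => rfl) (rowIdx board) (stc0 board, false)
  rw [← hG1] at hrow
  obtain ⟨hrf, hrl, hrr, hrg⟩ := hrow
  try dsimp only at hrf hrl hrr hrg
  simp only [stc0_length, stc0_rowlen, stc0_get2] at hrf hrl hrr hrg
  -- column-phase characterisation
  have hcol := markphase_char
    (C := fun p : Nat × Nat => get2 board p.2 p.1 ≠ 0 ∧ get2 board p.2 p.1 = get2 board (p.2+1) p.1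
      ∧ get2 board (p.2+1) p.1 = get2 board (p.2+2) p.1)
    (p1 := fun p => (p.2, p.1)) (p2 := fun p => (p.2+1, p.1)) (p3 := fun p => (p.2+2, p.1))
    (F := colStep board) (fun st i => rfl) (colIdx board) G1
  rw [← hG2] at hcol
  obtain ⟨hcf, hcl, hcr, hcg⟩ := hcol
  try dsimp only at hcf hcl hcr hcg
  -- final-pass characterisation
  have hfin := condset_char (C := fun p : Nat × Nat => get2 G2.1 p.1 p.2 = 1)
    (pos := fun p => p) (v := 0) (F := finStep G2.1) (fun b i => rfl) (finIdx board) board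
  obtain ⟨hfl, hfr, hfg⟩ := hfin
  try dsimp only at hfl hfr hfg
  have hclen : G1.1.length = board.length := hrl
  have hcrow : ∀ y, (G1.1.getD y []).length = (board.getD y []).length := hrr
  -- cell-level description of the mark grid after both phases
  have hG2g : ∀ y x, (get2 G2.1 y x = 1 ↔
      (markedL (board.getD y []) x ∨
        (x < (board.headD []).length ∧ markedL (colL board x) y))) := by
    intro y x
    rw [hcg y x, hclen, hcrow y, hrg y x]
    constructor
    · intro h
      split_ifs at h with hA hB
      · exact Or.inr ((QC_iff board y x).mp hA.1)
      · exact Or.inl ((QR_iff board y x).mp hB.1)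
      · exact absurd h (by norm_num)
    · intro hm
      split_ifs with hA hB
      · rfl
      · rfl
      · exfalso
        rcases hm with h2 | ⟨hxw, h1⟩
        · obtain ⟨hy, hx⟩ := MR_bounds board y x h2
          exact hB ⟨(QR_iff board y x).mpr h2, hy, hx⟩
        · have hy : y < board.length := MC_lt_h board y x h1
          exact hA ⟨(QC_iff board y x).mpr ⟨hxw, h1⟩, hy, lt_of_lt_of_le hxw (hge y hy)⟩
  -- A's zeroing condition, as a proposition about the input board
  have hcondA : ∀ y x,
      (((∃ p ∈ finIdx board, get2 G2.1 p.1 p.2 = 1 ∧ p = (y, x)) ∧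
        y < board.length ∧ x < (board.getD y []).length) ↔ markA board y x) := by
    intro y x
    unfold markA
    constructor
    · rintro ⟨⟨p, hp, hC, rfl⟩, hb⟩
      obtain ⟨hy, hx⟩ := (finIdx_mem board y x).mp hp
      exact ⟨⟨hx, ((hG2g y x).mp hC).imp id (fun h => h.2)⟩, hb⟩
    · rintro ⟨⟨hxw, hm⟩, hb⟩
      have hy : y < board.length := by
        rcases hm with h | h
        · exact (MR_bounds board y x h).1
        · exact MC_lt_h board y x h
      exact ⟨⟨(y, x), (finIdx_mem board y x).mpr ⟨hy, hxw⟩,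
        (hG2g y x).mpr (hm.imp id (fun h => ⟨hxw, h⟩)), rfl⟩, hb⟩
  refine ⟨?_, ?_, ?_, ?_, ?_, ?_, ?_⟩
  · -- the crushed flags agree
    try dsimp only
    have hA : G2.2 = true ↔ ((∃ y, y < board.length ∧ ∃ s, tripleAt (board.getD y []) s) ∨
        (∃ x, x < (board.headD []).length ∧ ∃ s, tripleAt (colL board x) s)) := by
      rw [hcf, hrf]
      simp only [Bool.false_eq_true, false_or]
      rw [rowflagA_iff, colflagA_iff]
    have hB : ((false || (List.range board.length).any (fun y => (rowScan board y).1)) ||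
          (List.range (board.headD []).length).any (fun x => (colScan board x).1)) = true ↔
        ((∃ y, y < board.length ∧ ∃ s, tripleAt (board.getD y []) s) ∨
         (∃ x, x < (board.headD []).length ∧ ∃ s, tripleAt (colL board x) s)) := by
      simp only [Bool.false_or, Bool.or_eq_true]
      rw [anyrow_iff, anycol_iff]
    exact Bool.coe_iff_coe.mp (hA.trans hB.symm)
  · exact hfl
  · exact length_foldl_setv _ _ _
  · exact hfr
  · exact fun y => rowlen_foldl_setv _ _ _ y
  · -- A's returned board, cell by cell
    intro y x
    constructor
    · intro h
      rw [hfg y x, if_pos ((hcondA y x).mpr h)]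
    · intro h
      rw [hfg y x, if_neg (fun hc => h ((hcondA y x).mp hc))]
  · -- B's returned board, cell by cell
    intro y x
    constructor
    · intro h
      rw [get2_foldl_setv, if_pos ?_]
      obtain ⟨hm, hb⟩ := h
      exact ⟨(marks_mem_iff board y x).mpr hm, hb⟩
    · intro h
      rw [get2_foldl_setv, if_neg ?_]
      rintro ⟨hm, hb⟩
      exact h ⟨(marks_mem_iff board y x).mp hm, hb⟩

-- ===== VERDICT (by name: the statements are the Claim_ definitions above) =====
theorem crush_spec : Claim_unchanged_crush := by
  unfold Claim_unchanged_crush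
  intro board _ hpre
  unfold Spec_crush
  intro hnd
  obtain ⟨hflag, hal, hbl, har, hbr, hacell, hbcell⟩ := crush_master board hpre
  refine Prod.ext hflag ?_
  refine grid_ext _ _ (hal.trans hbl.symm) (fun y => (har y).trans (hbr y).symm) ?_
  intro y x _ _
  have hAB : markA board y x ↔ markB board y x := by
    unfold markA markB
    constructor
    · rintro ⟨⟨hxw, hm⟩, hb⟩
      exact ⟨hm.imp id (fun h => ⟨hxw, h⟩), hb⟩
    · rintro ⟨hm, hb⟩
      refine ⟨?_, hb⟩
      rcases hm with hm | ⟨hxw, hm⟩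
      · have hxw : x < (board.headD []).length := by
          by_contra hc
          have hy := (MR_bounds board y x hm).1
          obtain ⟨s, ht, hs1, hs2⟩ := hm
          exact hnd ((D_iff board).mpr ⟨y, hy, s, ht, by omega⟩)
        exact ⟨hxw, Or.inl hm⟩
      · exact ⟨hxw, Or.inr hm⟩
  by_cases h : markB board y x
  · rw [(hacell y x).1 (hAB.mpr h), (hbcell y x).1 h]
  · rw [(hacell y x).2 (fun hc => h (hAB.mp hc)), (hbcell y x).2 h]

theorem crush_changed : Claim_changed_crush := by
  unfold Claim_changed_crush
  decide

theorem crush_tight : Claim_exact_crush := by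
  unfold Claim_exact_crush
  intro board _ hpre hD heq
  obtain ⟨hflag, hal, hbl, har, hbr, hacell, hbcell⟩ := crush_master board hpre
  obtain ⟨y, hy, s, ht, hw⟩ := (D_iff board).mp hD
  have hMR : markedL (board.getD y []) (s+2) := ⟨s, ht, by omega, by omega⟩
  have hval : get2 board y (s+2) ≠ 0 := by
    obtain ⟨hlen, hnz, e1, e2⟩ := ht
    unfold get2
    rw [← e2, ← e1]
    exact hnz
  have hA : get2 (crush board).2 y (s+2) = get2 board y (s+2) :=
    (hacell y (s+2)).2 (fun hc => absurd hc.1.1 (by omega))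
  have hB : get2 (crush_alt board).2 y (s+2) = 0 :=
    (hbcell y (s+2)).1 ⟨Or.inl hMR, hy, by have := ht.1; omega⟩
  have hcell := congrArg (fun r : Bool × List (List Int) => get2 r.2 y (s+2)) heq
  dsimp only at hcell
  rw [hA, hB] at hcell
  exact hval hcell
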